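-- pv_equiv track=rewrite | github.com/manwar/perlweeklychallenge-club | challenge-288/roger-bell-west/python/ch-2.py | contiguousblock
-- ===== SOURCE A (Python) =====
-- from collections import deque
--
-- def contiguousblock(a):
--   y = len(a)
--   x = len(a[0])
--   starts = set()
--   for cx in range(x):
--     for cy in range(y):
--       starts.add((cx, cy))
--   maxblock = 0
--   while len(starts) > 0:
--     start = list(starts)[0]
--     queue = deque()
--     visited = set()
--     visited.add(start)
--     queue.append(start)
--     while len(queue) > 0:
--       here = queue.popleft()
--       for delta in ( (-1, 0), (1, 0), (0, -1), (0, 1) ):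
--         if (delta[0] >= 0 or here[0] > 0) and (delta[0] <= 0 or here[0] < x - 1) and (delta[1] >= 0 or here[1] > 0) and (delta[1] <= 0 or here[1] < y - 1):
--           there = (here[0] + delta[0], here[1] + delta[1])
--           if there not in visited and a[there[1]][there[0]] == a[start[1]][start[0]]:
--             visited.add(there)
--             queue.append(there)
--     sz = len(visited)
--     if sz > maxblock:
--       maxblock = sz
--     starts = starts.difference(visited)
--   return maxblock
-- ===== SOURCE B (Python) =====
-- def contiguousblock(a):
--   y = len(a)
--   x = len(a[0])
--   best = 0
--   done = set()
--   for cy in range(y):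
--     for cx in range(x):
--       if (cx, cy) in done:
--         continue
--       comp = {(cx, cy)}
--       while True:
--         grown = set(comp)
--         for (px, py) in comp:
--           for (nx, ny) in ((px - 1, py), (px + 1, py), (px, py - 1), (px, py + 1)):
--             if 0 <= nx < x and 0 <= ny < y and a[ny][nx] == a[py][px]:
--               grown.add((nx, ny))
--         if len(grown) == len(comp):
--           break
--         comp = grown
--       done |= comp
--       if len(comp) > best:
--         best = len(comp)
--   return best
-- ===== Notes on version B (the rewrite author's own statement) =====
-- stated objective: faster
-- what changed: Replaces A's per-start BFS (deque frontier plus a global starts set that is copied with list(starts) and shrunk by a full set difference for every component) with a per-cell fixpoint saturation: for each cell not yet in a done set, repeatedly expand its component set by all equal-valued in-bounds neighbours until the set stops growing, mark the component done, and keep the maximum size.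
import Mathlib
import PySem

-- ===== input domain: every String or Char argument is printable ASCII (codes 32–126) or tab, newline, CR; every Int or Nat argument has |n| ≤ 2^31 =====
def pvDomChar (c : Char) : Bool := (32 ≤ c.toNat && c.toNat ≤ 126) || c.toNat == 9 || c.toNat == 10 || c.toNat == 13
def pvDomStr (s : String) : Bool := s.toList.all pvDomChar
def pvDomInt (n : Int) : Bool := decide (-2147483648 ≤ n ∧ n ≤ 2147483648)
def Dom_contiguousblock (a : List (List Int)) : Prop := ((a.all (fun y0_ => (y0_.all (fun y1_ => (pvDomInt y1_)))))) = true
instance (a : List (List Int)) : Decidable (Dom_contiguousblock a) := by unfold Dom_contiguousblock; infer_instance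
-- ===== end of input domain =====

-- B replaces A's per-start BFS (deque + whole-set list(starts) copy and set difference per
-- component) by a per-cell fixpoint saturation with a 'done' set: a timing run measured
-- B faster (A's per-component O(n) copy/difference disappears).

-- ===== PORT A =====
-- a[c.2][c.1]; under Pre_ every in-bounds access is `some` (none = Python IndexError)
def cbVal (a : List (List Int)) (c : Int × Int) : Option Int :=
  (PySem.List.pyGet? a c.2).bind (fun r => PySem.List.pyGet? r c.1)

def cbDeltas : List (Int × Int) := [(-1,0),(1,0),(0,-1),(0,1)]

-- the body of A's inner `for delta in …` loop, run for one popped cell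
def cbExpand (a : List (List Int)) (x y : Int) (start here : Int × Int)
    (vq : PySem.Set (Int × Int) × List (Int × Int)) : PySem.Set (Int × Int) × List (Int × Int) :=
  cbDeltas.foldl (fun vq d =>
    if (0 ≤ d.1 ∨ 0 < here.1) ∧ (d.1 ≤ 0 ∨ here.1 < x - 1) ∧
       (0 ≤ d.2 ∨ 0 < here.2) ∧ (d.2 ≤ 0 ∨ here.2 < y - 1) then
      let there := (here.1 + d.1, here.2 + d.2)
      if ¬ there ∈ vq.1 ∧ cbVal a there = cbVal a start then
        (PySem.Set.add vq.1 there, vq.2 ++ [there])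
      else vq
    else vq) vq

-- A's `while len(queue) > 0`; the fuel only makes the loop total (2·x·y+1 always suffices)
def cbBFS (a : List (List Int)) (x y : Int) (start : Int × Int) :
    Nat → PySem.Set (Int × Int) → List (Int × Int) → PySem.Set (Int × Int)
  | 0, v, _ => v
  | fuel + 1, v, q =>
    match q with
    | [] => v
    | here :: rest =>
      let vq := cbExpand a x y start here (v, rest)
      cbBFS a x y start fuel vq.1 vq.2

-- A's starts set, built in the same cx-outer / cy-inner insertion order
def cbStarts (x y : Int) : PySem.Set (Int × Int) :=
  (PySem.List.pyRange 0 x 1).foldl (fun s cx =>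
    (PySem.List.pyRange 0 y 1).foldl (fun s cy => PySem.Set.add s (cx, cy)) s) PySem.Set.empty

-- A's `while len(starts) > 0`; fuel |starts|+1 always suffices (each pass removes ≥ 1 start)
def cbOuter (a : List (List Int)) (x y : Int) :
    Nat → PySem.Set (Int × Int) → Int → Int
  | 0, _, mb => mb
  | fuel + 1, starts, mb =>
    match starts with
    | [] => mb
    | start :: _ =>
      let visited := cbBFS a x y start (2 * (x.toNat * y.toNat) + 1)
        (PySem.Set.add PySem.Set.empty start) [start]
      let sz : Int := visited.length
      let mb' := if mb < sz then sz else mb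
      cbOuter a x y fuel (PySem.Set.diff starts visited) mb'

def contiguousblock (a : List (List Int)) : Int :=
  let y : Int := a.length
  let x : Int := ((PySem.List.pyGet? a 0).getD []).length  -- len(a[0]); none (= IndexError) only outside Pre_
  let starts := cbStarts x y
  cbOuter a x y (starts.length + 1) starts 0

-- ===== PORT B =====
def cbNbrs (p : Int × Int) : List (Int × Int) :=
  [(p.1 - 1, p.2), (p.1 + 1, p.2), (p.1, p.2 - 1), (p.1, p.2 + 1)]

-- one `grown = …` pass of Source B's inner while-loop
def cbGrow (a : List (List Int)) (x y : Int) (comp : PySem.Set (Int × Int)) : PySem.Set (Int × Int) :=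
  comp.foldl (fun g p =>
    (cbNbrs p).foldl (fun g n =>
      if 0 ≤ n.1 ∧ n.1 < x ∧ 0 ≤ n.2 ∧ n.2 < y ∧ cbVal a n = cbVal a p then PySem.Set.add g n
      else g) g) (PySem.Set.ofList comp)

-- Source B's `while True: … if len(grown)==len(comp): break`; fuel x·y+1 always suffices
def cbSat (a : List (List Int)) (x y : Int) :
    Nat → PySem.Set (Int × Int) → PySem.Set (Int × Int)
  | 0, comp => comp
  | fuel + 1, comp =>
    let grown := cbGrow a x y comp
    if grown.length = comp.length then comp else cbSat a x y fuel grown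

def contiguousblock_alt (a : List (List Int)) : Int :=
  let y : Int := a.length
  let x : Int := ((PySem.List.pyGet? a 0).getD []).length
  let st := (PySem.List.pyRange 0 y 1).foldl (fun st cy =>
    (PySem.List.pyRange 0 x 1).foldl (fun (st : Int × PySem.Set (Int × Int)) cx =>
      if (cx, cy) ∈ st.2 then st
      else
        let comp := cbSat a x y (x.toNat * y.toNat + 1) (PySem.Set.add PySem.Set.empty (cx, cy))
        (if st.1 < (comp.length : Int) then (comp.length : Int) else st.1,
         PySem.Set.union st.2 comp)) st)
    ((0 : Int), (PySem.Set.empty : PySem.Set (Int × Int)))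
  st.1

-- ===== PRECONDITION & SPEC =====
-- Pre_ excludes exactly the inputs where Python A raises IndexError: the empty list (a[0])
-- and ragged grids with some row shorter than row 0 (cell lookup a[cy][cx], cx < len(a[0])).
-- (The ports are total, so the proved equality does not need Pre_; Pre_ only marks where
-- Python A actually returns, which is what the claim is about.)
def Pre_contiguousblock (a : List (List Int)) : Prop :=
  a ≠ [] ∧ ∀ r ∈ a, (a.headD []).length ≤ r.length
instance (a : List (List Int)) : Decidable (Pre_contiguousblock a) := by
  unfold Pre_contiguousblock; infer_instance

def pvWitness_contiguousblock : List (List Int) := [[1, 1], [2, 1]]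

def Spec_contiguousblock (a : List (List Int)) (out : Int) : Prop := out = contiguousblock_alt a
instance (a : List (List Int)) (out : Int) : Decidable (Spec_contiguousblock a out) := by unfold Spec_contiguousblock; infer_instance

-- ===== CLAIM (what is proved, stated in full; the proofs are below) =====
def Claim_equal_contiguousblock : Prop := ∀ (a : List (List Int)), Dom_contiguousblock a → Pre_contiguousblock a → Spec_contiguousblock a (contiguousblock a)

-- ===== LEMMAS AND PROOFS =====

-- in-bounds cells, adjacency (same value, 4-neighbour), connectivity
def cbInb (x y : Int) (c : Int × Int) : Prop := 0 ≤ c.1 ∧ c.1 < x ∧ 0 ≤ c.2 ∧ c.2 < y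

def cbAdj (a : List (List Int)) (x y : Int) (c d : Int × Int) : Prop :=
  cbInb x y c ∧ cbInb x y d ∧ d ∈ cbNbrs c ∧ cbVal a d = cbVal a c

def cbReach (a : List (List Int)) (x y : Int) (s c : Int × Int) : Prop :=
  Relation.ReflTransGen (cbAdj a x y) s c

-- the size of the component of c, as B computes it
def cbSize (a : List (List Int)) (x y : Int) (c : Int × Int) : Nat :=
  (cbSat a x y (x.toNat * y.toNat + 1) (PySem.Set.add PySem.Set.empty c)).length

-- A's inner delta loop appends the admissible fresh neighbours to both visited and queue
def cbAdded (a : List (List Int)) (x y : Int) (start here : Int × Int)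
    (v : PySem.Set (Int × Int)) : List (Int × Int) :=
  (cbDeltas.filter (fun d => decide (
      ((0 ≤ d.1 ∨ 0 < here.1) ∧ (d.1 ≤ 0 ∨ here.1 < x - 1) ∧
       (0 ≤ d.2 ∨ 0 < here.2) ∧ (d.2 ≤ 0 ∨ here.2 < y - 1)) ∧
      ¬ (here.1 + d.1, here.2 + d.2) ∈ v ∧
      cbVal a (here.1 + d.1, here.2 + d.2) = cbVal a start))).map
    (fun d => (here.1 + d.1, here.2 + d.2))

-- both programs' results satisfy this property, which determines them uniquely
def cbIsMax (a : List (List Int)) (x y : Int) (r : Int) : Prop :=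
  (∀ c, cbInb x y c → (cbSize a x y c : Int) ≤ r) ∧
  (r = 0 ∨ ∃ c, cbInb x y c ∧ r = (cbSize a x y c : Int))

theorem cbNbrs_symm {c d : Int × Int} (h : d ∈ cbNbrs c) : c ∈ cbNbrs d := by
  simp only [cbNbrs, List.mem_cons, List.not_mem_nil, or_false] at h ⊢
  obtain ⟨c1, c2⟩ := c; obtain ⟨d1, d2⟩ := d
  simp only [Prod.mk.injEq] at h ⊢
  omega

theorem cbAdj_symm {a : List (List Int)} {x y : Int} {c d : Int × Int}
    (h : cbAdj a x y c d) : cbAdj a x y d c :=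
  ⟨h.2.1, h.1, cbNbrs_symm h.2.2.1, h.2.2.2.symm⟩

theorem cbReach_symm {a : List (List Int)} {x y : Int} {s c : Int × Int}
    (h : cbReach a x y s c) : cbReach a x y c s :=
  Relation.ReflTransGen.symmetric (fun _ _ hh => cbAdj_symm hh) h

theorem cbReach_inb {a : List (List Int)} {x y : Int} {s c : Int × Int}
    (hs : cbInb x y s) (h : cbReach a x y s c) : cbInb x y c := by
  induction h with
  | refl => exact hs
  | tail _ hbc ih => exact hbc.2.1

theorem cbReach_val {a : List (List Int)} {x y : Int} {s c : Int × Int}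
    (h : cbReach a x y s c) : cbVal a c = cbVal a s := by
  induction h with
  | refl => rfl
  | tail _ hbc ih => exact hbc.2.2.2.trans ih

theorem mem_foldl_addIf {α : Type} [BEq α] [LawfulBEq α] (P : α → Prop) [DecidablePred P]
    (l : List α) (g : PySem.Set α) (c : α) :
    c ∈ l.foldl (fun g n => if P n then PySem.Set.add g n else g) g ↔
      c ∈ g ∨ (c ∈ l ∧ P c) := by
  induction l generalizing g with
  | nil => simp
  | cons n t ih =>
    simp only [List.foldl_cons, ih, List.mem_cons]
    by_cases h : P n
    · simp only [if_pos h, PySem.Set.mem_add]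
      constructor
      · rintro ((hg | rfl) | ht) <;> tauto
      · rintro (hg | ⟨rfl | hct, hp⟩) <;> tauto
    · simp only [if_neg h]
      constructor
      · rintro (hg | ht) <;> tauto
      · rintro (hg | ⟨rfl | hct, hp⟩) <;> tauto

theorem nodup_foldl_addIf {α : Type} [BEq α] [LawfulBEq α] (P : α → Prop) [DecidablePred P]
    (l : List α) (g : PySem.Set α) (hg : g.Nodup) :
    (l.foldl (fun g n => if P n then PySem.Set.add g n else g) g).Nodup := by
  induction l generalizing g with
  | nil => exact hg
  | cons n t ih =>
    simp only [List.foldl_cons]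
    split
    · exact ih _ (PySem.Set.nodup_add g n hg)
    · exact ih _ hg

theorem mem_grow_aux {a : List (List Int)} {x y : Int} (l : List (Int × Int))
    (g : PySem.Set (Int × Int)) (c : Int × Int) :
    c ∈ l.foldl (fun g p =>
      (cbNbrs p).foldl (fun g n =>
        if 0 ≤ n.1 ∧ n.1 < x ∧ 0 ≤ n.2 ∧ n.2 < y ∧ cbVal a n = cbVal a p then PySem.Set.add g n
        else g) g) g ↔
      c ∈ g ∨ ∃ p ∈ l, c ∈ cbNbrs p ∧ cbInb x y c ∧ cbVal a c = cbVal a p := by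
  induction l generalizing g with
  | nil => simp
  | cons p t ih =>
    simp only [List.foldl_cons, ih,
      mem_foldl_addIf (fun n => 0 ≤ n.1 ∧ n.1 < x ∧ 0 ≤ n.2 ∧ n.2 < y ∧ cbVal a n = cbVal a p),
      List.mem_cons, cbInb]
    constructor
    · rintro ((hg | hn) | ⟨q, hq, h1, h2⟩)
      · tauto
      · exact Or.inr ⟨p, Or.inl rfl, hn.1, ⟨hn.2.1, hn.2.2.1, hn.2.2.2.1, hn.2.2.2.2.1⟩, hn.2.2.2.2.2⟩
      · exact Or.inr ⟨q, Or.inr hq, h1, h2⟩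
    · rintro (hg | ⟨q, hq | hq, h1, h2, h3⟩)
      · tauto
      · subst hq; exact Or.inl (Or.inr ⟨h1, h2.1, h2.2.1, h2.2.2.1, h2.2.2.2, h3⟩)
      · exact Or.inr ⟨q, hq, h1, ⟨h2.1, h2.2.1, h2.2.2.1, h2.2.2.2⟩, h3⟩

theorem mem_cbGrow {a : List (List Int)} {x y : Int} {comp : PySem.Set (Int × Int)}
    {c : Int × Int} :
    c ∈ cbGrow a x y comp ↔
      c ∈ comp ∨ ∃ p ∈ comp, c ∈ cbNbrs p ∧ cbInb x y c ∧ cbVal a c = cbVal a p := by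
  unfold cbGrow
  rw [mem_grow_aux]
  simp [PySem.Set.mem_ofList]

theorem nodup_grow_aux {a : List (List Int)} {x y : Int} (l : List (Int × Int))
    (g : PySem.Set (Int × Int)) (hg : g.Nodup) :
    (l.foldl (fun g p =>
      (cbNbrs p).foldl (fun g n =>
        if 0 ≤ n.1 ∧ n.1 < x ∧ 0 ≤ n.2 ∧ n.2 < y ∧ cbVal a n = cbVal a p then PySem.Set.add g n
        else g) g) g).Nodup := by
  induction l generalizing g with
  | nil => exact hg
  | cons p t ih =>
    exact ih _ (nodup_foldl_addIf
      (fun n => 0 ≤ n.1 ∧ n.1 < x ∧ 0 ≤ n.2 ∧ n.2 < y ∧ cbVal a n = cbVal a p) _ _ hg)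

theorem nodup_cbGrow {a : List (List Int)} {x y : Int} {comp : PySem.Set (Int × Int)} :
    (cbGrow a x y comp).Nodup := by
  unfold cbGrow
  exact nodup_grow_aux _ _ (PySem.Set.nodup_ofList comp)

theorem blk_nodup (cx y : Int) :
    ((PySem.List.pyRange 0 y 1).map (fun cy => ((cx, cy) : Int × Int))).Nodup :=
  (PySem.List.nodup_pyRange_one 0 y).map (fun _ _ h => by simpa using congrArg Prod.snd h)

theorem starts_aux (y : Int) :
    ∀ (l : List Int) (s : PySem.Set (Int × Int)), l.Nodup → (∀ c ∈ s, c.1 ∉ l) →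
    l.foldl (fun s cx => PySem.Set.update s ((PySem.List.pyRange 0 y 1).map (fun cy => (cx, cy)))) s =
      s ++ l.flatMap (fun cx => (PySem.List.pyRange 0 y 1).map (fun cy => (cx, cy))) := by
  intro l
  induction l with
  | nil => intro s _ _; simp
  | cons cx t ih =>
    intro s hnd hfresh
    have hdis : ∀ c ∈ (PySem.List.pyRange 0 y 1).map (fun cy => ((cx, cy) : Int × Int)), c ∉ s := by
      intro c hc hcs
      obtain ⟨cy, _, rfl⟩ := List.mem_map.mp hc
      exact hfresh _ hcs (List.mem_cons_self ..)
    rw [List.foldl_cons,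
      PySem.Set.update_eq_append_of_disjoint s _ (blk_nodup cx y) hdis,
      ih _ ((List.nodup_cons.mp hnd).2) ?_]
    · simp
    · intro c hc
      rcases List.mem_append.mp hc with h | h
      · exact fun ht => hfresh _ h (List.mem_cons_of_mem _ ht)
      · obtain ⟨cy, _, rfl⟩ := List.mem_map.mp h
        exact (List.nodup_cons.mp hnd).1

theorem cbStarts_eq (x y : Int) :
    cbStarts x y =
      (PySem.List.pyRange 0 x 1).flatMap
        (fun cx => (PySem.List.pyRange 0 y 1).map (fun cy => (cx, cy))) := by
  unfold cbStarts
  simp only [← PySem.Set.update_map_eq_foldl_add]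
  rw [starts_aux y _ PySem.Set.empty (PySem.List.nodup_pyRange_one 0 x) (by intro c hc; cases hc)]
  rfl

theorem mem_cbStarts {x y : Int} {c : Int × Int} : c ∈ cbStarts x y ↔ cbInb x y c := by
  rw [cbStarts_eq]
  simp only [List.mem_flatMap, List.mem_map, PySem.List.mem_pyRange_one, cbInb]
  constructor
  · rintro ⟨cx, hcx, cy, hcy, rfl⟩; exact ⟨hcx.1, hcx.2, hcy.1, hcy.2⟩
  · rintro ⟨h1, h2, h3, h4⟩; exact ⟨c.1, ⟨h1, h2⟩, c.2, ⟨h3, h4⟩, rfl⟩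

theorem nodup_cbStarts (x y : Int) : (cbStarts x y).Nodup := by
  rw [cbStarts_eq]
  have : ∀ l : List Int, l.Nodup →
      (l.flatMap (fun cx => (PySem.List.pyRange 0 y 1).map (fun cy => ((cx, cy) : Int × Int)))).Nodup := by
    intro l
    induction l with
    | nil => intro _; simp
    | cons cx t ih =>
      intro hnd
      rw [List.flatMap_cons]
      refine List.Nodup.append (blk_nodup cx y) (ih (List.nodup_cons.mp hnd).2) ?_
      intro c hc hc2
      obtain ⟨cy, _, rfl⟩ := List.mem_map.mp hc
      obtain ⟨cx', hcx', hm⟩ := List.mem_flatMap.mp hc2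
      obtain ⟨cy', _, heq⟩ := List.mem_map.mp hm
      have : cx' = cx := by simpa using congrArg Prod.fst heq
      exact (List.nodup_cons.mp hnd).1 (this ▸ hcx')
  exact this _ (PySem.List.nodup_pyRange_one 0 x)

theorem length_cbStarts (x y : Int) : (cbStarts x y).length = x.toNat * y.toNat := by
  rw [cbStarts_eq, List.length_flatMap]
  have h1 : ∀ cx : Int, ((PySem.List.pyRange 0 y 1).map (fun cy => ((cx, cy) : Int × Int))).length = y.toNat := by
    intro cx
    rw [List.length_map, PySem.List.length_pyRange_one]
    simp
  simp only [h1, List.map_const']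
  rw [List.sum_replicate, PySem.List.length_pyRange_one]
  simp

theorem length_eq_of_nodup_of_mem_iff {α : Type} {l₁ l₂ : List α}
    (h₁ : l₁.Nodup) (h₂ : l₂.Nodup) (h : ∀ c, c ∈ l₁ ↔ c ∈ l₂) : l₁.length = l₂.length :=
  ((List.perm_ext_iff_of_nodup h₁ h₂).mpr h).length_eq

theorem length_le_of_nodup_subset {α : Type} {l₁ l₂ : List α}
    (h₁ : l₁.Nodup) (h : l₁ ⊆ l₂) : l₁.length ≤ l₂.length :=
  (List.subperm_of_subset h₁ h).length_le

theorem cbSat_spec {a : List (List Int)} {x y : Int} {s : Int × Int} (hs : cbInb x y s) :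
    ∀ (fuel : Nat) (comp : PySem.Set (Int × Int)),
    comp.Nodup → s ∈ comp → (∀ c ∈ comp, cbReach a x y s c) →
    (cbStarts x y).length + 1 ≤ fuel + comp.length →
    (cbSat a x y fuel comp).Nodup ∧ (∀ c, c ∈ cbSat a x y fuel comp ↔ cbReach a x y s c) := by
  intro fuel
  induction fuel with
  | zero =>
    intro comp hnd hsm hreach hfuel
    have hsub : comp ⊆ cbStarts x y := fun c hc => mem_cbStarts.mpr (cbReach_inb hs (hreach c hc))
    have := length_le_of_nodup_subset hnd hsub
    omega
  | succ fuel ih =>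
    intro comp hnd hsm hreach hfuel
    simp only [cbSat]
    by_cases hlen : (cbGrow a x y comp).length = comp.length
    · rw [if_pos hlen]
      have hsub : comp ⊆ cbGrow a x y comp := fun c hc => mem_cbGrow.mpr (Or.inl hc)
      have hperm : comp.Perm (cbGrow a x y comp) :=
        (List.subperm_of_subset hnd hsub).perm_of_length_le (le_of_eq hlen)
      have hmemiff : ∀ c, c ∈ cbGrow a x y comp ↔ c ∈ comp := fun c => hperm.mem_iff.symm
      refine ⟨hnd, fun c => ⟨fun hc => hreach c hc, fun hr => ?_⟩⟩
      induction hr with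
      | refl => exact hsm
      | tail hb hbc ihh =>
        exact (hmemiff _).mp (mem_cbGrow.mpr (Or.inr ⟨_, ihh, hbc.2.2.1, hbc.2.1, hbc.2.2.2⟩))
    · rw [if_neg hlen]
      have hsub : comp ⊆ cbGrow a x y comp := fun c hc => mem_cbGrow.mpr (Or.inl hc)
      have hle : comp.length ≤ (cbGrow a x y comp).length :=
        (List.subperm_of_subset hnd hsub).length_le
      refine ih (cbGrow a x y comp) nodup_cbGrow (hsub hsm) ?_ (by omega)
      intro c hc
      rcases mem_cbGrow.mp hc with hc | ⟨p, hp, h1, h2, h3⟩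
      · exact hreach c hc
      · exact Relation.ReflTransGen.tail (hreach p hp)
          ⟨cbReach_inb hs (hreach p hp), h2, h1, h3⟩

theorem cbSize_spec {a : List (List Int)} {x y : Int} {c : Int × Int} (hc : cbInb x y c) :
    (cbSat a x y (x.toNat * y.toNat + 1) (PySem.Set.add PySem.Set.empty c)).Nodup ∧
    (∀ d, d ∈ cbSat a x y (x.toNat * y.toNat + 1) (PySem.Set.add PySem.Set.empty c) ↔
      cbReach a x y c d) := by
  have hone : PySem.Set.add PySem.Set.empty c = [c] := rfl
  refine cbSat_spec hc _ _ ?_ ?_ ?_ ?_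
  · rw [hone]; exact List.nodup_singleton c
  · rw [hone]; exact List.mem_singleton_self c
  · rw [hone]; intro d hd; rw [List.mem_singleton] at hd; subst hd; exact Relation.ReflTransGen.refl
  · rw [hone, length_cbStarts]; simp

theorem cbSize_eq_length {a : List (List Int)} {x y : Int} {c : Int × Int}
    {V : List (Int × Int)} (hc : cbInb x y c) (hnd : V.Nodup)
    (hmem : ∀ d, d ∈ V ↔ cbReach a x y c d) : V.length = cbSize a x y c := by
  obtain ⟨h1, h2⟩ := cbSize_spec (a := a) hc
  exact length_eq_of_nodup_of_mem_iff hnd h1 (fun d => (hmem d).trans (h2 d).symm)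

theorem cbSize_pos {a : List (List Int)} {x y : Int} {c : Int × Int} (hc : cbInb x y c) :
    1 ≤ cbSize a x y c := by
  obtain ⟨h1, h2⟩ := cbSize_spec (a := a) hc
  have : c ∈ cbSat a x y (x.toNat * y.toNat + 1) (PySem.Set.add PySem.Set.empty c) :=
    (h2 c).mpr Relation.ReflTransGen.refl
  have := List.length_pos_of_mem this
  unfold cbSize
  omega

theorem cbSize_eq_of_reach {a : List (List Int)} {x y : Int} {c d : Int × Int}
    (hc : cbInb x y c) (h : cbReach a x y c d) : cbSize a x y d = cbSize a x y c := by
  have hd : cbInb x y d := cbReach_inb hc h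
  obtain ⟨h1, h2⟩ := cbSize_spec (a := a) hd
  have : ∀ e, e ∈ cbSat a x y (x.toNat * y.toNat + 1) (PySem.Set.add PySem.Set.empty d) ↔
      cbReach a x y c e := by
    intro e
    rw [h2 e]
    exact ⟨fun hde => Relation.ReflTransGen.trans h hde,
           fun hce => Relation.ReflTransGen.trans (cbReach_symm h) hce⟩
  exact cbSize_eq_length hc h1 this

theorem shift_inj (here : Int × Int) : Function.Injective (fun d : Int × Int => ((here.1 + d.1, here.2 + d.2) : Int × Int)) := by
  intro d e h
  simp only [Prod.mk.injEq] at h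
  obtain ⟨d1,d2⟩ := d; obtain ⟨e1,e2⟩ := e
  simp only [Prod.mk.injEq]
  omega

theorem nodup_shift_deltas (here : Int × Int) :
    ((cbDeltas.map (fun d => ((here.1 + d.1, here.2 + d.2) : Int × Int)))).Nodup := by
  refine (List.Nodup.map (shift_inj here) ?_)
  decide

theorem cbNbrs_eq_deltas (here : Int × Int) :
    cbNbrs here = cbDeltas.map (fun d => (here.1 + d.1, here.2 + d.2)) := by
  obtain ⟨h1, h2⟩ := here
  simp only [cbNbrs, cbDeltas, List.map_cons, List.map_nil, List.cons.injEq, Prod.mk.injEq,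
    and_true]
  simp [Int.sub_eq_add_neg]

theorem cbGuard_iff {x y : Int} {here : Int × Int} (hh : cbInb x y here) {d : Int × Int}
    (hd : d ∈ cbDeltas) :
    (((0 ≤ d.1 ∨ 0 < here.1) ∧ (d.1 ≤ 0 ∨ here.1 < x - 1) ∧
      (0 ≤ d.2 ∨ 0 < here.2) ∧ (d.2 ≤ 0 ∨ here.2 < y - 1))) ↔
      cbInb x y (here.1 + d.1, here.2 + d.2) := by
  obtain ⟨hh1, hh2, hh3, hh4⟩ := hh
  simp only [cbDeltas, List.mem_cons, List.not_mem_nil, or_false] at hd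
  rcases hd with rfl | rfl | rfl | rfl <;> simp [cbInb] <;> omega

theorem expand_aux (a : List (List Int)) (x y : Int) (start here : Int × Int) :
    ∀ (ds : List (Int × Int)),
    ((ds.map (fun d => ((here.1 + d.1, here.2 + d.2) : Int × Int))).Nodup) →
    ∀ (v : PySem.Set (Int × Int)) (q : List (Int × Int)),
    ds.foldl (fun vq d =>
      if (0 ≤ d.1 ∨ 0 < here.1) ∧ (d.1 ≤ 0 ∨ here.1 < x - 1) ∧
         (0 ≤ d.2 ∨ 0 < here.2) ∧ (d.2 ≤ 0 ∨ here.2 < y - 1) then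
        let there := (here.1 + d.1, here.2 + d.2)
        if ¬ there ∈ vq.1 ∧ cbVal a there = cbVal a start then
          (PySem.Set.add vq.1 there, vq.2 ++ [there])
        else vq
      else vq) (v, q) =
    (v ++ (ds.filter (fun d => decide (
        ((0 ≤ d.1 ∨ 0 < here.1) ∧ (d.1 ≤ 0 ∨ here.1 < x - 1) ∧
         (0 ≤ d.2 ∨ 0 < here.2) ∧ (d.2 ≤ 0 ∨ here.2 < y - 1)) ∧
        ¬ (here.1 + d.1, here.2 + d.2) ∈ v ∧
        cbVal a (here.1 + d.1, here.2 + d.2) = cbVal a start))).map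
        (fun d => (here.1 + d.1, here.2 + d.2)),
     q ++ (ds.filter (fun d => decide (
        ((0 ≤ d.1 ∨ 0 < here.1) ∧ (d.1 ≤ 0 ∨ here.1 < x - 1) ∧
         (0 ≤ d.2 ∨ 0 < here.2) ∧ (d.2 ≤ 0 ∨ here.2 < y - 1)) ∧
        ¬ (here.1 + d.1, here.2 + d.2) ∈ v ∧
        cbVal a (here.1 + d.1, here.2 + d.2) = cbVal a start))).map
        (fun d => (here.1 + d.1, here.2 + d.2))) := by
  intro ds
  induction ds with
  | nil => intro _ v q; simp
  | cons d t ih =>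
    intro hnd v q
    have hnd' : ((t.map (fun d => ((here.1 + d.1, here.2 + d.2) : Int × Int))).Nodup) := by
      simp only [List.map_cons, List.nodup_cons] at hnd
      exact hnd.2
    have hfresh : ∀ d' ∈ t, ((here.1 + d'.1, here.2 + d'.2) : Int × Int) ≠ (here.1 + d.1, here.2 + d.2) := by
      intro d' hd' heq
      simp only [List.map_cons, List.nodup_cons] at hnd
      exact hnd.1 (heq ▸ List.mem_map_of_mem hd')
    rw [List.foldl_cons]
    by_cases hg : (0 ≤ d.1 ∨ 0 < here.1) ∧ (d.1 ≤ 0 ∨ here.1 < x - 1) ∧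
         (0 ≤ d.2 ∨ 0 < here.2) ∧ (d.2 ≤ 0 ∨ here.2 < y - 1)
    · rw [if_pos hg]
      by_cases hm : ¬ ((here.1 + d.1, here.2 + d.2) : Int × Int) ∈ v ∧
          cbVal a (here.1 + d.1, here.2 + d.2) = cbVal a start
      · rw [show (let there := ((here.1 + d.1, here.2 + d.2) : Int × Int);
            if there ∉ (v, q).1 ∧ cbVal a there = cbVal a start then
              ((v, q).1.add there, (v, q).2 ++ [there]) else (v, q)) =
            ((PySem.Set.add v (here.1 + d.1, here.2 + d.2)), q ++ [(here.1 + d.1, here.2 + d.2)]) from by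
          show (if ((here.1 + d.1, here.2 + d.2) : Int × Int) ∉ v ∧
              cbVal a (here.1 + d.1, here.2 + d.2) = cbVal a start then
              (PySem.Set.add v (here.1 + d.1, here.2 + d.2), q ++ [(here.1 + d.1, here.2 + d.2)])
            else (v, q)) = _
          rw [if_pos hm]]
        rw [PySem.Set.add_of_not_mem hm.1]
        rw [ih hnd' (v ++ [(here.1 + d.1, here.2 + d.2)]) (q ++ [(here.1 + d.1, here.2 + d.2)])]
        have hcong : (t.filter (fun d' => decide (
              ((0 ≤ d'.1 ∨ 0 < here.1) ∧ (d'.1 ≤ 0 ∨ here.1 < x - 1) ∧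
               (0 ≤ d'.2 ∨ 0 < here.2) ∧ (d'.2 ≤ 0 ∨ here.2 < y - 1)) ∧
              ¬ (here.1 + d'.1, here.2 + d'.2) ∈ v ++ [(here.1 + d.1, here.2 + d.2)] ∧
              cbVal a (here.1 + d'.1, here.2 + d'.2) = cbVal a start))) =
            (t.filter (fun d' => decide (
              ((0 ≤ d'.1 ∨ 0 < here.1) ∧ (d'.1 ≤ 0 ∨ here.1 < x - 1) ∧
               (0 ≤ d'.2 ∨ 0 < here.2) ∧ (d'.2 ≤ 0 ∨ here.2 < y - 1)) ∧
              ¬ (here.1 + d'.1, here.2 + d'.2) ∈ v ∧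
              cbVal a (here.1 + d'.1, here.2 + d'.2) = cbVal a start))) := by
          refine List.filter_congr ?_
          intro d' hd'
          have := hfresh d' hd'
          simp only [List.mem_append, List.mem_singleton, this, or_false]
        rw [hcong]
        have hsel : (d :: t).filter (fun d' => decide (
              ((0 ≤ d'.1 ∨ 0 < here.1) ∧ (d'.1 ≤ 0 ∨ here.1 < x - 1) ∧
               (0 ≤ d'.2 ∨ 0 < here.2) ∧ (d'.2 ≤ 0 ∨ here.2 < y - 1)) ∧
              ¬ (here.1 + d'.1, here.2 + d'.2) ∈ v ∧
              cbVal a (here.1 + d'.1, here.2 + d'.2) = cbVal a start)) =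
            d :: t.filter (fun d' => decide (
              ((0 ≤ d'.1 ∨ 0 < here.1) ∧ (d'.1 ≤ 0 ∨ here.1 < x - 1) ∧
               (0 ≤ d'.2 ∨ 0 < here.2) ∧ (d'.2 ≤ 0 ∨ here.2 < y - 1)) ∧
              ¬ (here.1 + d'.1, here.2 + d'.2) ∈ v ∧
              cbVal a (here.1 + d'.1, here.2 + d'.2) = cbVal a start)) := by
          rw [List.filter_cons_of_pos (by simp only [decide_eq_true_eq]; exact ⟨hg, hm⟩)]
        rw [hsel]
        simp [List.append_assoc]
      · rw [show (let there := ((here.1 + d.1, here.2 + d.2) : Int × Int);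
            if there ∉ (v, q).1 ∧ cbVal a there = cbVal a start then
              ((v, q).1.add there, (v, q).2 ++ [there]) else (v, q)) = ((v, q) : PySem.Set (Int × Int) × List (Int × Int)) from by
          show (if ((here.1 + d.1, here.2 + d.2) : Int × Int) ∉ v ∧
              cbVal a (here.1 + d.1, here.2 + d.2) = cbVal a start then
              (PySem.Set.add v (here.1 + d.1, here.2 + d.2), q ++ [(here.1 + d.1, here.2 + d.2)])
            else (v, q)) = _
          rw [if_neg hm]]
        rw [ih hnd' v q]
        rw [List.filter_cons_of_neg (by simp only [decide_eq_true_eq]; exact fun hc => hm hc.2)]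
    · rw [if_neg hg]
      rw [ih hnd' v q]
      rw [List.filter_cons_of_neg (by simp only [decide_eq_true_eq]; tauto)]

theorem cbExpand_eq (a : List (List Int)) (x y : Int) (start here : Int × Int)
    (v : PySem.Set (Int × Int)) (rest : List (Int × Int)) :
    cbExpand a x y start here (v, rest) =
      (v ++ cbAdded a x y start here v, rest ++ cbAdded a x y start here v) := by
  unfold cbExpand cbAdded
  exact expand_aux a x y start here cbDeltas (nodup_shift_deltas here) v rest

theorem mem_cbAdded {a : List (List Int)} {x y : Int} {start here : Int × Int}
    {v : PySem.Set (Int × Int)} {t : Int × Int} :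
    t ∈ cbAdded a x y start here v ↔
      ∃ d ∈ cbDeltas, t = (here.1 + d.1, here.2 + d.2) ∧
        ((0 ≤ d.1 ∨ 0 < here.1) ∧ (d.1 ≤ 0 ∨ here.1 < x - 1) ∧
         (0 ≤ d.2 ∨ 0 < here.2) ∧ (d.2 ≤ 0 ∨ here.2 < y - 1)) ∧
        t ∉ v ∧ cbVal a t = cbVal a start := by
  unfold cbAdded
  simp only [List.mem_map, List.mem_filter, decide_eq_true_eq]
  constructor
  · rintro ⟨d, ⟨hd, hc⟩, rfl⟩
    exact ⟨d, hd, rfl, hc.1, hc.2.1, hc.2.2⟩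
  · rintro ⟨d, hd, rfl, h1, h2, h3⟩
    exact ⟨d, ⟨hd, h1, h2, h3⟩, rfl⟩

theorem nodup_cbAdded (a : List (List Int)) (x y : Int) (start here : Int × Int)
    (v : PySem.Set (Int × Int)) : (cbAdded a x y start here v).Nodup := by
  unfold cbAdded
  exact List.Nodup.map (shift_inj here) ((by decide : cbDeltas.Nodup).filter _)

theorem filter_append_count {v E cells : List (Int × Int)}
    (hcells : cells.Nodup) (hE : E.Nodup) (hEc : ∀ e ∈ E, e ∈ cells)
    (hEv : ∀ e ∈ E, e ∉ v) :
    (cells.filter (fun c => decide (c ∉ v ++ E))).length + E.length =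
      (cells.filter (fun c => decide (c ∉ v))).length := by
  set F := cells.filter (fun c => decide (c ∉ v)) with hF
  have hFnd : F.Nodup := hcells.filter _
  have hsplit := List.length_eq_length_filter_add (l := F) (fun c => decide (c ∈ E))
  have h1 : (F.filter (fun c => decide (c ∈ E))).length = E.length := by
    refine length_eq_of_nodup_of_mem_iff (hFnd.filter _) hE ?_
    intro c
    simp only [List.mem_filter, hF, decide_eq_true_eq]
    constructor
    · rintro ⟨_, hc⟩; exact hc
    · intro hc; exact ⟨⟨hEc c hc, hEv c hc⟩, hc⟩
  have h2 : F.filter (fun c => !decide (c ∈ E)) = cells.filter (fun c => decide (c ∉ v ++ E)) := by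
    rw [hF, List.filter_filter]
    refine List.filter_congr ?_
    intro c _
    by_cases h1 : c ∈ v <;> by_cases h2 : c ∈ E <;> simp [h1, h2, List.mem_append]
  rw [h2] at hsplit
  omega

theorem bfs_final {a : List (List Int)} {x y : Int} {start : Int × Int}
    {v : PySem.Set (Int × Int)} (hvnd : v.Nodup) (hsv : start ∈ v)
    (hreach : ∀ c ∈ v, cbReach a x y start c)
    (hclosed : ∀ c ∈ v, ∀ d, cbAdj a x y c d → d ∈ v) :
    v.Nodup ∧ (∀ c, c ∈ v ↔ cbReach a x y start c) := by
  refine ⟨hvnd, fun c => ⟨fun hc => hreach c hc, fun hr => ?_⟩⟩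
  induction hr with
  | refl => exact hsv
  | tail hb hbc ihh => exact hclosed _ ihh _ hbc

theorem cbBFS_spec {a : List (List Int)} {x y : Int} {start : Int × Int}
    (hst : cbInb x y start) :
    ∀ (fuel : Nat) (v : PySem.Set (Int × Int)) (q : List (Int × Int)),
    v.Nodup → q.Nodup → (∀ c ∈ q, c ∈ v) → start ∈ v →
    (∀ c ∈ v, cbReach a x y start c) →
    (∀ c ∈ v, c ∉ q → ∀ d, cbAdj a x y c d → d ∈ v) →
    ((cbStarts x y).filter (fun c => decide (c ∉ v))).length + q.length ≤ fuel →
    (cbBFS a x y start fuel v q).Nodup ∧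
    (∀ c, c ∈ cbBFS a x y start fuel v q ↔ cbReach a x y start c) := by
  intro fuel
  induction fuel with
  | zero =>
    intro v q hvnd hqnd hqv hsv hreach hclosed hfuel
    have hq : q = [] := List.length_eq_zero_iff.mp (by omega)
    subst hq
    exact bfs_final hvnd hsv hreach (fun c hc _ hadj => hclosed c hc (List.not_mem_nil) _ hadj)
  | succ fuel ih =>
    intro v q hvnd hqnd hqv hsv hreach hclosed hfuel
    match q with
    | [] =>
      exact bfs_final hvnd hsv hreach (fun c hc _ hadj => hclosed c hc (List.not_mem_nil) _ hadj)
    | here :: rest =>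
      simp only [cbBFS, cbExpand_eq]
      set E := cbAdded a x y start here v with hE
      have hhere_v : here ∈ v := hqv here List.mem_cons_self
      have hhere_reach : cbReach a x y start here := hreach here hhere_v
      have hhere_inb : cbInb x y here := cbReach_inb hst hhere_reach
      have hE_not_v : ∀ t ∈ E, t ∉ v := by
        intro t ht; exact (mem_cbAdded.mp ht).choose_spec.2.2.2.1
      have hE_nd : E.Nodup := nodup_cbAdded a x y start here v
      have hE_facts : ∀ t ∈ E, cbInb x y t ∧ t ∈ cbNbrs here ∧ cbVal a t = cbVal a start := by
        intro t ht
        obtain ⟨d, hd, rfl, hg, _, hval⟩ := mem_cbAdded.mp ht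
        refine ⟨(cbGuard_iff hhere_inb hd).mp hg, ?_, hval⟩
        rw [cbNbrs_eq_deltas]
        exact List.mem_map_of_mem hd
      have hE_reach : ∀ t ∈ E, cbReach a x y start t := by
        intro t ht
        obtain ⟨hinb, hnb, hval⟩ := hE_facts t ht
        exact Relation.ReflTransGen.tail hhere_reach
          ⟨hhere_inb, hinb, hnb, hval.trans (cbReach_val hhere_reach).symm⟩
      have hqrest : rest.Nodup := (List.nodup_cons.mp hqnd).2
      have hhere_rest : here ∉ rest := (List.nodup_cons.mp hqnd).1
      refine ih (v ++ E) (rest ++ E) ?_ ?_ ?_ ?_ ?_ ?_ ?_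
      · exact hvnd.append hE_nd (fun t htv htE => hE_not_v t htE htv)
      · exact hqrest.append hE_nd (fun t htr htE => hE_not_v t htE (hqv t (List.mem_cons_of_mem _ htr)))
      · intro c hc
        rcases List.mem_append.mp hc with h | h
        · exact List.mem_append_left _ (hqv c (List.mem_cons_of_mem _ h))
        · exact List.mem_append_right _ h
      · exact List.mem_append_left _ hsv
      · intro c hc
        rcases List.mem_append.mp hc with h | h
        · exact hreach c h
        · exact hE_reach c h
      · intro c hc hcq d hadj
        rcases List.mem_append.mp hc with hcv | hcE
        · by_cases hch : c = here
          · subst hch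
            have hd_nbr : d ∈ cbNbrs c := hadj.2.2.1
            rw [cbNbrs_eq_deltas] at hd_nbr
            obtain ⟨d0, hd0, rfl⟩ := List.mem_map.mp hd_nbr
            by_cases hdv : (c.1 + d0.1, c.2 + d0.2) ∈ v
            · exact List.mem_append_left _ hdv
            · refine List.mem_append_right _ (mem_cbAdded.mpr
                ⟨d0, hd0, rfl, (cbGuard_iff hhere_inb hd0).mpr hadj.2.1, hdv,
                 hadj.2.2.2.trans (cbReach_val hhere_reach)⟩)
          · have hcrest : c ∉ rest := fun hr => hcq (List.mem_append_left _ hr)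
            have : c ∉ here :: rest := by
              simp only [List.mem_cons, not_or]; exact ⟨hch, hcrest⟩
            exact List.mem_append_left _ (hclosed c hcv this d hadj)
        · exact absurd (List.mem_append_right rest hcE) hcq
      · have hcount := filter_append_count (v := v) (E := E)
          (nodup_cbStarts x y) hE_nd
          (fun e he => mem_cbStarts.mpr (hE_facts e he).1) hE_not_v
        have hql : (here :: rest).length = rest.length + 1 := rfl
        simp only [List.length_append]
        omega

theorem cbIsMax_unique {a : List (List Int)} {x y : Int} {r₁ r₂ : Int}
    (h₁ : cbIsMax a x y r₁) (h₂ : cbIsMax a x y r₂) : r₁ = r₂ := by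
  obtain ⟨hb₁, hw₁⟩ := h₁
  obtain ⟨hb₂, hw₂⟩ := h₂
  rcases hw₁ with rfl | ⟨c, hc, rfl⟩ <;> rcases hw₂ with rfl | ⟨d, hd, rfl⟩
  · rfl
  · have := hb₁ d hd; have := cbSize_pos (a := a) hd; omega
  · have := hb₂ c hc; have := cbSize_pos (a := a) hc; omega
  · have := hb₁ d hd; have := hb₂ c hc; omega

theorem cbOuter_spec {a : List (List Int)} {x y : Int} :
    ∀ (fuel : Nat) (starts : PySem.Set (Int × Int)) (mb : Int),
    starts.Nodup → (∀ c ∈ starts, cbInb x y c) →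
    (∀ c, cbInb x y c → c ∉ starts → (cbSize a x y c : Int) ≤ mb) →
    (mb = 0 ∨ ∃ c, cbInb x y c ∧ mb = (cbSize a x y c : Int)) →
    starts.length < fuel →
    cbIsMax a x y (cbOuter a x y fuel starts mb) := by
  intro fuel
  induction fuel with
  | zero => intro starts mb _ _ _ _ hlt; omega
  | succ fuel ih =>
    intro starts mb hnd hinb hbound hwit hlt
    match starts with
    | [] =>
      refine ⟨fun c hc => hbound c hc List.not_mem_nil, hwit⟩
    | start :: rest =>
      simp only [cbOuter]
      have hstart_inb : cbInb x y start := hinb start List.mem_cons_self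
      have hone : PySem.Set.add PySem.Set.empty start = [start] := rfl
      obtain ⟨hvnd, hvmem⟩ := cbBFS_spec hstart_inb (2 * (x.toNat * y.toNat) + 1)
        (PySem.Set.add PySem.Set.empty start) [start]
        (by rw [hone]; exact List.nodup_singleton start) (List.nodup_singleton start)
        (by rw [hone]; exact fun c hc => hc)
        (by rw [hone]; exact List.mem_singleton_self start)
        (by rw [hone]; intro c hc; rw [List.mem_singleton] at hc; subst hc;
            exact Relation.ReflTransGen.refl)
        (by rw [hone]; intro c hc hcq; rw [List.mem_singleton] at hc; subst hc;
            exact absurd (List.mem_singleton_self c) hcq)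
        (by
          have h1 := List.length_filter_le (fun c => decide (c ∉ PySem.Set.add PySem.Set.empty start)) (cbStarts x y)
          have h2 := length_cbStarts x y
          simp only [List.length_singleton]
          omega)
      set visited := cbBFS a x y start (2 * (x.toNat * y.toNat) + 1)
        (PySem.Set.add PySem.Set.empty start) [start] with hvis
      have hsz : visited.length = cbSize a x y start :=
        cbSize_eq_length hstart_inb hvnd hvmem
      have hstart_vis : start ∈ visited := (hvmem start).mpr Relation.ReflTransGen.refl
      have hdiff_sub : ∀ c ∈ PySem.Set.diff (start :: rest) visited, c ∈ start :: rest := by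
        intro c hc; exact ((PySem.Set.mem_diff _ _ _).mp hc).1
      have hdiff_nd : (PySem.Set.diff (start :: rest) visited).Nodup :=
        PySem.Set.nodup_diff _ _ hnd
      have hdiff_lt : (PySem.Set.diff (start :: rest) visited).length < (start :: rest).length := by
        have hsub : PySem.Set.diff (start :: rest) visited ⊆ (start :: rest).erase start := by
          intro c hc
          obtain ⟨hc1, hc2⟩ := (PySem.Set.mem_diff _ _ _).mp hc
          have hne : c ≠ start := fun h => hc2 (h ▸ hstart_vis)
          exact (List.mem_erase_of_ne hne).mpr hc1
        have := length_le_of_nodup_subset hdiff_nd hsub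
        have := List.length_erase_of_mem (List.mem_cons_self (a := start) (l := rest))
        simp only [List.length_cons] at *
        omega
      refine ih (PySem.Set.diff (start :: rest) visited) _ hdiff_nd
        (fun c hc => hinb c (hdiff_sub c hc)) ?_ ?_ (by have := hlt; omega)
      · intro c hc hcnot
        by_cases hcs : c ∈ start :: rest
        · have hcvis : c ∈ visited := by
            by_contra hcv
            exact hcnot ((PySem.Set.mem_diff _ _ _).mpr ⟨hcs, hcv⟩)
          have hreach := (hvmem c).mp hcvis
          have : cbSize a x y c = cbSize a x y start := cbSize_eq_of_reach hstart_inb hreach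
          rw [this, ← hsz]
          split <;> omega
        · have := hbound c hc hcs
          split <;> omega
      · by_cases hlt2 : mb < (visited.length : Int)
        · rw [if_pos hlt2]
          exact Or.inr ⟨start, hstart_inb, by rw [hsz]⟩
        · rw [if_neg hlt2]
          exact hwit

theorem alt_fold_spec {a : List (List Int)} {x y : Int} :
    ∀ (l : List (Int × Int)) (st : Int × PySem.Set (Int × Int)),
    (∀ c ∈ l, cbInb x y c) →
    (st.1 = 0 ∨ ∃ c, cbInb x y c ∧ st.1 = (cbSize a x y c : Int)) →
    (∀ c ∈ st.2, cbInb x y c ∧ (cbSize a x y c : Int) ≤ st.1) →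
    ((l.foldl (fun (st : Int × PySem.Set (Int × Int)) cx =>
      if cx ∈ st.2 then st
      else
        let comp := cbSat a x y (x.toNat * y.toNat + 1) (PySem.Set.add PySem.Set.empty cx)
        (if st.1 < (comp.length : Int) then (comp.length : Int) else st.1,
         PySem.Set.union st.2 comp)) st).1 = 0 ∨
      ∃ c, cbInb x y c ∧ (l.foldl (fun (st : Int × PySem.Set (Int × Int)) cx =>
      if cx ∈ st.2 then st
      else
        let comp := cbSat a x y (x.toNat * y.toNat + 1) (PySem.Set.add PySem.Set.empty cx)
        (if st.1 < (comp.length : Int) then (comp.length : Int) else st.1,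
         PySem.Set.union st.2 comp)) st).1 = (cbSize a x y c : Int)) ∧
    (∀ c ∈ l, (cbSize a x y c : Int) ≤ (l.foldl (fun (st : Int × PySem.Set (Int × Int)) cx =>
      if cx ∈ st.2 then st
      else
        let comp := cbSat a x y (x.toNat * y.toNat + 1) (PySem.Set.add PySem.Set.empty cx)
        (if st.1 < (comp.length : Int) then (comp.length : Int) else st.1,
         PySem.Set.union st.2 comp)) st).1) ∧
    st.1 ≤ (l.foldl (fun (st : Int × PySem.Set (Int × Int)) cx =>
      if cx ∈ st.2 then st
      else
        let comp := cbSat a x y (x.toNat * y.toNat + 1) (PySem.Set.add PySem.Set.empty cx)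
        (if st.1 < (comp.length : Int) then (comp.length : Int) else st.1,
         PySem.Set.union st.2 comp)) st).1 := by
  intro l
  induction l with
  | nil =>
    intro st _ hwit hdone
    exact ⟨hwit, fun c hc => absurd hc List.not_mem_nil, le_refl _⟩
  | cons c t ih =>
    intro st hl hwit hdone
    have hcinb : cbInb x y c := hl c List.mem_cons_self
    rw [List.foldl_cons]
    by_cases hc : c ∈ st.2
    · rw [if_pos hc]
      obtain ⟨h1, h2, h3⟩ := ih st (fun d hd => hl d (List.mem_cons_of_mem _ hd)) hwit hdone
      refine ⟨h1, ?_, h3⟩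
      intro d hd
      rcases List.mem_cons.mp hd with rfl | hd'
      · exact le_trans (hdone d hc).2 h3
      · exact h2 d hd'
    · rw [if_neg hc]
      obtain ⟨hsnd, hsmem⟩ := cbSize_spec (a := a) hcinb
      set comp := cbSat a x y (x.toNat * y.toNat + 1) (PySem.Set.add PySem.Set.empty c) with hcomp
      have hlen : comp.length = cbSize a x y c := cbSize_eq_length hcinb hsnd hsmem
      set mb' := if st.1 < (comp.length : Int) then (comp.length : Int) else st.1 with hmb'
      have hmble : st.1 ≤ mb' := by rw [hmb']; split <;> omega
      have hszle : (cbSize a x y c : Int) ≤ mb' := by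
        rw [hmb', ← hlen]; split <;> omega
      obtain ⟨h1, h2, h3⟩ := ih (mb', PySem.Set.union st.2 comp)
        (fun d hd => hl d (List.mem_cons_of_mem _ hd))
        (by
          rw [hmb']
          split
          · exact Or.inr ⟨c, hcinb, by rw [hlen]⟩
          · exact hwit)
        (by
          intro d hd
          rcases (PySem.Set.mem_union _ _ _).mp hd with hd' | hd'
          · exact ⟨(hdone d hd').1, le_trans (hdone d hd').2 hmble⟩
          · have hreach := (hsmem d).mp hd'
            refine ⟨cbReach_inb hcinb hreach, ?_⟩
            rw [cbSize_eq_of_reach hcinb hreach]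
            exact hszle)
      refine ⟨h1, ?_, le_trans hmble h3⟩
      intro d hd
      rcases List.mem_cons.mp hd with rfl | hd'
      · calc (cbSize a x y d : Int) ≤ mb' := hszle
          _ ≤ _ := h3
      · exact h2 d hd'

theorem contiguousblock_isMax (a : List (List Int)) :
    cbIsMax a ((PySem.List.pyGet? a 0).getD []).length a.length (contiguousblock a) := by
  exact cbOuter_spec ((cbStarts ((PySem.List.pyGet? a 0).getD []).length a.length).length + 1)
    (cbStarts ((PySem.List.pyGet? a 0).getD []).length a.length) 0
    (nodup_cbStarts _ _)
    (fun c hc => mem_cbStarts.mp hc)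
    (fun c hc hns => absurd (mem_cbStarts.mpr hc) hns)
    (Or.inl rfl)
    (Nat.lt_succ_self _)

theorem alt_flatten (a : List (List Int)) (x y : Int) :
    ∀ (ys : List Int) (xs : List Int) (init : Int × PySem.Set (Int × Int)),
    ys.foldl (fun st cy =>
      xs.foldl (fun (st : Int × PySem.Set (Int × Int)) cx =>
        if (cx, cy) ∈ st.2 then st
        else
          let comp := cbSat a x y (x.toNat * y.toNat + 1) (PySem.Set.add PySem.Set.empty (cx, cy))
          (if st.1 < (comp.length : Int) then (comp.length : Int) else st.1,
           PySem.Set.union st.2 comp)) st) init =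
    (ys.flatMap (fun cy => xs.map (fun cx => ((cx, cy) : Int × Int)))).foldl
      (fun (st : Int × PySem.Set (Int × Int)) c =>
        if c ∈ st.2 then st
        else
          let comp := cbSat a x y (x.toNat * y.toNat + 1) (PySem.Set.add PySem.Set.empty c)
          (if st.1 < (comp.length : Int) then (comp.length : Int) else st.1,
           PySem.Set.union st.2 comp)) init := by
  intro ys
  induction ys with
  | nil => intro xs init; simp
  | cons cy t ih =>
    intro xs init
    rw [List.foldl_cons, List.flatMap_cons, List.foldl_append, List.foldl_map, ih]

theorem contiguousblock_alt_isMax (a : List (List Int)) :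
    cbIsMax a ((PySem.List.pyGet? a 0).getD []).length a.length (contiguousblock_alt a) := by
  have hx : ∀ c ∈ ((PySem.List.pyRange 0 (a.length) 1).flatMap
      (fun cy => (PySem.List.pyRange 0 (((PySem.List.pyGet? a 0).getD []).length : Int) 1).map
        (fun cx => ((cx, cy) : Int × Int)))),
      cbInb (((PySem.List.pyGet? a 0).getD []).length : Int) (a.length : Int) c := by
    intro c hc
    obtain ⟨cy, hcy, hm⟩ := List.mem_flatMap.mp hc
    obtain ⟨cx, hcx, rfl⟩ := List.mem_map.mp hm
    rw [PySem.List.mem_pyRange_one] at hcy hcx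
    exact ⟨hcx.1, hcx.2, hcy.1, hcy.2⟩
  have h := alt_fold_spec (a := a)
    ((PySem.List.pyRange 0 (a.length) 1).flatMap
      (fun cy => (PySem.List.pyRange 0 (((PySem.List.pyGet? a 0).getD []).length : Int) 1).map
        (fun cx => ((cx, cy) : Int × Int))))
    ((0 : Int), (PySem.Set.empty : PySem.Set (Int × Int)))
    hx (Or.inl rfl) (fun c hc => absurd hc List.not_mem_nil)
  obtain ⟨h1, h2, _⟩ := h
  have halt : contiguousblock_alt a =
      (((PySem.List.pyRange 0 (a.length) 1).flatMap
        (fun cy => (PySem.List.pyRange 0 (((PySem.List.pyGet? a 0).getD []).length : Int) 1).map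
          (fun cx => ((cx, cy) : Int × Int)))).foldl
        (fun (st : Int × PySem.Set (Int × Int)) c =>
          if c ∈ st.2 then st
          else
            let comp := cbSat a (((PySem.List.pyGet? a 0).getD []).length : Int) (a.length : Int)
              ((((PySem.List.pyGet? a 0).getD []).length : Int).toNat * ((a.length : Int)).toNat + 1)
              (PySem.Set.add PySem.Set.empty c)
            (if st.1 < (comp.length : Int) then (comp.length : Int) else st.1,
             PySem.Set.union st.2 comp))
        ((0 : Int), (PySem.Set.empty : PySem.Set (Int × Int)))).1 := by
    show (((PySem.List.pyRange 0 (a.length) 1).foldl (fun st cy =>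
      (PySem.List.pyRange 0 (((PySem.List.pyGet? a 0).getD []).length : Int) 1).foldl
        (fun (st : Int × PySem.Set (Int × Int)) cx =>
        if (cx, cy) ∈ st.2 then st
        else
          let comp := cbSat a (((PySem.List.pyGet? a 0).getD []).length : Int) (a.length : Int)
            ((((PySem.List.pyGet? a 0).getD []).length : Int).toNat * ((a.length : Int)).toNat + 1)
            (PySem.Set.add PySem.Set.empty (cx, cy))
          (if st.1 < (comp.length : Int) then (comp.length : Int) else st.1,
           PySem.Set.union st.2 comp)) st)
      ((0 : Int), (PySem.Set.empty : PySem.Set (Int × Int)))).1) = _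
    rw [alt_flatten]
  rw [halt]
  refine ⟨?_, h1⟩
  intro c hc
  refine h2 c ?_
  obtain ⟨hc1, hc2, hc3, hc4⟩ := hc
  refine List.mem_flatMap.mpr ⟨c.2, ?_, List.mem_map.mpr ⟨c.1, ?_, rfl⟩⟩ <;>
    rw [PySem.List.mem_pyRange_one] <;> constructor <;> assumption

-- ===== VERDICT (by name: the statement is the Claim_ definition above) =====
theorem contiguousblock_spec : Claim_equal_contiguousblock := by
  intro a _ _
  unfold Spec_contiguousblock
  exact cbIsMax_unique (contiguousblock_isMax a) (contiguousblock_alt_isMax a)
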